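-- pv_equiv track=rewrite | github.com/cirosantilli/project-euler-solvers | solvers/483.py | build_prime_masks
-- ===== SOURCE A (Python) =====
-- def build_prime_masks(n: int):
--     """
--     Returns:
--       masks[k] = bitmask encoding prime-power content of k
--       prime_info = list of (p, emax, offset)
--     Encoding rule:
--       For prime p with max exponent emax, we reserve emax bits at some offset.
--       If number has exponent e, we set the lowest e bits in that block.
--       Then LCM corresponds to bitwise OR.
--     """
--     spf = list(range(n + 1))
--     for i in range(2, int(n**0.5) + 1):
--         if spf[i] == i:
--             step = i
--             start = i * i
--             for j in range(start, n + 1, step):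
--                 if spf[j] == j:
--                     spf[j] = i
--
--     primes = [i for i in range(2, n + 1) if spf[i] == i]
--
--     prime_info = []
--     offset = 0
--     pinfo = {}
--     for p in primes:
--         emax = 0
--         t = p
--         while t <= n:
--             emax += 1
--             t *= p
--         prime_info.append((p, emax, offset))
--         pinfo[p] = (emax, offset)
--         offset += emax
--
--     masks = [0] * (n + 1)
--     masks[1] = 0
--     for m in range(2, n + 1):
--         x = m
--         mask = 0
--         while x > 1:
--             p = spf[x]
--             e = 0
--             while x % p == 0:
--                 x //= p
--                 e += 1
--             _, off = pinfo[p]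
--             mask |= ((1 << e) - 1) << off
--         masks[m] = mask
--
--     return masks, prime_info
-- ===== SOURCE B (Python) =====
-- def build_prime_masks(n: int):
--     # Same output as the original, but the per-number mask is a DP reusing
--     # earlier masks: masks[m] = bits for spf[m]'s exponent OR masks[r],
--     # where r is m with its smallest prime factor divided out.
--     spf = list(range(n + 1))
--     i = 2
--     while i * i <= n:
--         if spf[i] == i:
--             for j in range(i * i, n + 1, i):
--                 if spf[j] == j:
--                     spf[j] = i
--         i += 1
--
--     prime_info = []
--     pinfo = {}
--     offset = 0
--     for p in range(2, n + 1):
--         if spf[p] == p: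
--             emax = 1
--             t = p * p
--             while t <= n:
--                 emax += 1
--                 t *= p
--             prime_info.append((p, emax, offset))
--             pinfo[p] = offset
--             offset += emax
--
--     masks = [0] * (n + 1)
--     for m in range(2, n + 1):
--         p = spf[m]
--         e = 1
--         r = m // p
--         while r % p == 0:
--             r //= p
--             e += 1
--         masks[m] = (((1 << e) - 1) << pinfo[p]) | masks[r]
--     return masks, prime_info
-- ===== Notes on version B (the rewrite author's own statement) =====
-- stated objective: alternative
-- what changed: The per-number mask loop that fully factorizes every m is replaced by a memoized DP: extract only the smallest prime factor's exponent e and remainder r, then reuse the already-computed masks[r] (masks[m] = bits(e,offset) | masks[r]); the sieve bound uses i*i<=n instead of a float sqrt and prime_info is built in one pass over 2..n without an intermediate primes list.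
-- outside the precondition, e.g. on build_prime_masks(0): A raises IndexError, B returns ([0], []); on build_prime_masks(-1): A raises TypeError, B returns ([], [])
import Mathlib
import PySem

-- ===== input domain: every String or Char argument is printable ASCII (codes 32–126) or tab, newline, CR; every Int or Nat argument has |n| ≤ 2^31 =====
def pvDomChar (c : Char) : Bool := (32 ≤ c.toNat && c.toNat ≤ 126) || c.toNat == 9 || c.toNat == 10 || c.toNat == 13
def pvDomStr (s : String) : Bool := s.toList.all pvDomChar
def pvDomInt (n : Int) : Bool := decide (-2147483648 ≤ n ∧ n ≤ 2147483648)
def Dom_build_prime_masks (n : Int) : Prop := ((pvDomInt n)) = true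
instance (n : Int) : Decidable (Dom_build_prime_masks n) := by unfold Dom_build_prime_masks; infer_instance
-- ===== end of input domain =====

-- B replaces A's full factorization of every m by a memoized DP on masks[m // p^e];
-- equivalence is proved for n ≥ 1 (A raises for n ≤ 0).

-- ===== SHARED LOOP HELPERS (these while loops are textually identical in both Pythons) =====

-- 'for j in range(i*i, n+1, i): if spf[j] == j: spf[j] = i'  (one sieve row; same line in A and B)
def pvSieveRow (n i : Int) (spf : List Int) : List Int :=
  (PySem.List.pyRange (i * i) (n + 1) i).foldl
    (fun spf j => if PySem.List.pyGetD spf j 0 == j then PySem.List.pySetD spf j i else spf) spf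

-- 'while t <= n: emax += 1; t *= p'  (fuel; t at least doubles each pass, so n.toNat+1 fuel always suffices)
def pvEmaxLoop (n p : Int) : Nat → Int → Int → Int
  | 0, emax, _ => emax
  | f + 1, emax, t => if t ≤ n then pvEmaxLoop n p f (emax + 1) (t * p) else emax

-- 'while x % p == 0: x //= p; e += 1'  (fuel; x strictly shrinks each pass, so x.toNat fuel always suffices)
def pvDivLoop (p : Int) : Nat → Int → Int → Int × Int
  | 0, e, x => (e, x)
  | f + 1, e, x =>
    if PySem.Int.mod x p == 0 then pvDivLoop p f (e + 1) (PySem.Int.floordiv x p) else (e, x)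

-- ===== PORT A =====

-- A's inner 'while x > 1' loop computing one full-factorization mask (fuel: on a sieved spf,
-- x strictly decreases every pass, so x.toNat fuel always suffices).
-- pinfo[p]: Python raises KeyError on a missing key; on every input admitted by Pre_ the key is
-- present (p is prime there), so the .getD default is never the returned value inside Pre_.
def pvMaskLoopA (spf : List Int) (pinfo : PySem.Dict Int (Int × Int)) : Nat → Int → Int → Int
  | 0, _, mask => mask
  | f + 1, x, mask =>
    if 1 < x then
      let p := PySem.List.pyGetD spf x 0
      let ex := pvDivLoop p x.toNat 0 x
      let off := (pinfo.getD p (0, 0)).2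
      pvMaskLoopA spf pinfo f ex.2 (PySem.Int.bor mask (((1 <<< ex.1.toNat) - 1) <<< off.toNat))
    else mask

def build_prime_masks (n : Int) : List Int × (List (Int × Int × Int)) :=
  -- spf = list(range(n+1)); sieve over i in range(2, int(n**0.5)+1)
  -- int(n**0.5) is ported as Nat.sqrt: exact for 0 ≤ n ≤ 2^31 (the double computed by CPython's
  -- n**0.5 is correctly rounded there and never crosses an integer, so int() of it is isqrt(n)).
  let spf := (PySem.List.pyRange 2 ((Nat.sqrt n.toNat : Int) + 1)).foldl
    (fun spf i => if PySem.List.pyGetD spf i 0 == i then pvSieveRow n i spf else spf)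
    (PySem.List.pyRange 0 (n + 1))
  -- primes = [i for i in range(2, n+1) if spf[i] == i]
  let primes := (PySem.List.pyRange 2 (n + 1)).foldl
    (fun acc i => if PySem.List.pyGetD spf i 0 == i then acc ++ [i] else acc) []
  -- for p in primes: emax loop; prime_info.append; pinfo[p] = (emax, offset); offset += emax
  let st := primes.foldl
    (fun (st : List (Int × Int × Int) × PySem.Dict Int (Int × Int) × Int) p =>
      let emax := pvEmaxLoop n p (n.toNat + 1) 0 p
      (st.1 ++ [(p, emax, st.2.2)], st.2.1.insert p (emax, st.2.2), st.2.2 + emax))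
    ([], PySem.Dict.empty, 0)
  -- masks = [0]*(n+1); masks[1] = 0; for m in range(2, n+1): masks[m] = <while x > 1 loop>
  let masks := (PySem.List.pyRange 2 (n + 1)).foldl
    (fun masks m => PySem.List.pySetD masks m (pvMaskLoopA spf st.2.1 m.toNat m 0))
    (PySem.List.pySetD (PySem.List.pyRepeat [(0 : Int)] (n + 1)) 1 0)
  (masks, st.1)

-- ===== PORT B =====

-- 'i = 2; while i*i <= n: <sieve row if spf[i]==i>; i += 1'  (fuel; i reaches sqrt n ≤ n, so n.toNat+1 suffices)
def pvSieveB (n : Int) : Nat → Int → List Int → List Int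
  | 0, _, spf => spf
  | f + 1, i, spf =>
    if i * i ≤ n then
      pvSieveB n f (i + 1) (if PySem.List.pyGetD spf i 0 == i then pvSieveRow n i spf else spf)
    else spf

def build_prime_masks_alt (n : Int) : List Int × (List (Int × Int × Int)) :=
  let spf := pvSieveB n (n.toNat + 1) 2 (PySem.List.pyRange 0 (n + 1))
  -- one pass over range(2, n+1): if spf[p] == p: emax from (1, p*p); pinfo[p] = offset
  let st := (PySem.List.pyRange 2 (n + 1)).foldl
    (fun (st : List (Int × Int × Int) × PySem.Dict Int Int × Int) p =>
      if PySem.List.pyGetD spf p 0 == p then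
        let emax := pvEmaxLoop n p (n.toNat + 1) 1 (p * p)
        (st.1 ++ [(p, emax, st.2.2)], st.2.1.insert p st.2.2, st.2.2 + emax)
      else st)
    ([], PySem.Dict.empty, 0)
  -- DP: masks[m] = (((1 << e) - 1) << pinfo[p]) | masks[r]  with p = spf[m], r = m // p^e
  let masks := (PySem.List.pyRange 2 (n + 1)).foldl
    (fun masks m =>
      let p := PySem.List.pyGetD spf m 0
      let er := pvDivLoop p m.toNat 1 (PySem.Int.floordiv m p)
      PySem.List.pySetD masks m
        (PySem.Int.bor (((1 <<< er.1.toNat) - 1) <<< (st.2.1.getD p 0).toNat)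
          (PySem.List.pyGetD masks er.2 0)))
    (PySem.List.pyRepeat [(0 : Int)] (n + 1))
  (masks, st.1)

-- ===== PRECONDITION & SPEC =====

-- Pre_ excludes exactly n ≤ 0, where Python A raises (IndexError at masks[1] = 0 for n = 0,
-- TypeError from int((n)**0.5) on a complex value for n < 0).
def Pre_build_prime_masks (n : Int) : Prop := 1 ≤ n
instance (n : Int) : Decidable (Pre_build_prime_masks n) := by
  unfold Pre_build_prime_masks; infer_instance

def pvWitness_build_prime_masks : Int := 6

def Spec_build_prime_masks (n : Int) (out : List Int × (List (Int × Int × Int))) : Prop :=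
  out = build_prime_masks_alt n
instance (n : Int) (out : List Int × (List (Int × Int × Int))) :
    Decidable (Spec_build_prime_masks n out) := by unfold Spec_build_prime_masks; infer_instance

-- ===== CLAIM (what is proved, stated in full; the proofs are below) =====
def Claim_equal_build_prime_masks : Prop :=
  ∀ (n : Int), Dom_build_prime_masks n → Pre_build_prime_masks n →
    Spec_build_prime_masks n (build_prime_masks n)
-- ===== LEMMAS AND PROOFS =====

-- ---- bitwise facts on nonnegative ints ----
lemma pv_bor_nonneg {a b : Int} (ha : 0 ≤ a) (hb : 0 ≤ b) : 0 ≤ PySem.Int.bor a b := by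
  rw [PySem.Int.bor_of_nonneg ha hb]; exact Int.natCast_nonneg _

lemma pv_zero_bor (b : Int) : PySem.Int.bor 0 b = b := by
  rw [PySem.Int.bor_comm, PySem.Int.bor_zero]

lemma pv_bor_assoc {a b c : Int} (ha : 0 ≤ a) (hb : 0 ≤ b) (hc : 0 ≤ c) :
    PySem.Int.bor (PySem.Int.bor a b) c = PySem.Int.bor a (PySem.Int.bor b c) := by
  rw [PySem.Int.bor_of_nonneg ha hb, PySem.Int.bor_of_nonneg hb hc,
    PySem.Int.bor_of_nonneg (Int.natCast_nonneg _) hc,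
    PySem.Int.bor_of_nonneg ha (Int.natCast_nonneg _)]
  simp [Nat.or_assoc]

-- ---- the sieve drivers agree ----
lemma pv_sq_iff (n i : Int) (h2 : 2 ≤ i) : i * i ≤ n ↔ i ≤ ((Nat.sqrt n.toNat : Nat) : Int) := by
  have hi0 : (0:Int) ≤ i := by omega
  have hcast : ((i.toNat : Nat) : Int) = i := Int.toNat_of_nonneg hi0
  have hi2 : (2:Nat) ≤ i.toNat := by omega
  have h4 : (4:Nat) ≤ i.toNat * i.toNat := Nat.mul_le_mul hi2 hi2
  constructor
  · intro h
    have hii : ((i.toNat * i.toNat : Nat) : Int) = i * i := by push_cast [hcast]; ring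
    have hn0 : (0:Int) ≤ n := by
      have : (4:Int) ≤ i * i := by rw [← hii]; exact_mod_cast h4
      omega
    have h1 : i.toNat * i.toNat ≤ n.toNat := by
      have : ((i.toNat * i.toNat : Nat) : Int) ≤ ((n.toNat : Nat) : Int) := by
        rw [hii]; omega
      exact_mod_cast this
    have := Nat.le_sqrt.mpr h1
    omega
  · intro h
    have h1 : i.toNat ≤ Nat.sqrt n.toNat := by omega
    have h2' : i.toNat * i.toNat ≤ n.toNat := Nat.le_sqrt.mp h1
    have hn4 : (4:Nat) ≤ n.toNat := le_trans h4 h2'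
    have : ((i.toNat * i.toNat : Nat) : Int) ≤ ((n.toNat : Nat) : Int) := by exact_mod_cast h2'
    push_cast [hcast] at this
    have hn : ((n.toNat : Nat) : Int) = n := by omega
    calc i * i ≤ ((n.toNat : Nat) : Int) := by linarith
      _ = n := hn

lemma pvSieveB_eq (n : Int) : ∀ (f : Nat) (i : Int) (spf : List Int), 2 ≤ i →
    ((Nat.sqrt n.toNat : Int) + 1) - i ≤ (f : Int) →
    pvSieveB n f i spf =
      (PySem.List.pyRange i ((Nat.sqrt n.toNat : Int) + 1)).foldl
        (fun spf i => if PySem.List.pyGetD spf i 0 == i then pvSieveRow n i spf else spf) spf := by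
  intro f
  induction f with
  | zero =>
    intro i spf h2 hf
    rw [PySem.List.pyRange_one_eq_nil (by push_cast at hf ⊢; omega)]
    rfl
  | succ f ih =>
    intro i spf h2 hf
    by_cases h : i * i ≤ n
    · have hlt : i < (Nat.sqrt n.toNat : Int) + 1 := by
        have := (pv_sq_iff n i h2).mp h; omega
      rw [PySem.List.pyRange_one_cons hlt]
      simp only [List.foldl_cons]
      rw [show pvSieveB n (f+1) i spf
          = pvSieveB n f (i+1) (if PySem.List.pyGetD spf i 0 == i then pvSieveRow n i spf else spf)
          from by simp [pvSieveB, h]]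
      exact ih (i+1) _ (by omega) (by push_cast at hf ⊢; omega)
    · have hge : (Nat.sqrt n.toNat : Int) + 1 ≤ i := by
        have := mt (pv_sq_iff n i h2).mpr h; omega
      rw [PySem.List.pyRange_one_eq_nil hge]
      simp [pvSieveB, h]

lemma pv_len_range0 (n : Int) :
    (PySem.List.pyRange 0 (n + 1)).length = (n + 1).toNat := by
  by_cases hn : 0 ≤ n + 1
  · rw [show (n+1) = ((n+1).toNat : Int) by omega, PySem.List.pyRange_zero_natCast]
    simp; omega
  · rw [PySem.List.pyRange_one_eq_nil (by omega)]
    simp; omega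

lemma pv_getD_range0 (n k : Int) (h0 : 0 ≤ k) (hk : k ≤ n) :
    PySem.List.pyGetD (PySem.List.pyRange 0 (n + 1)) k 0 = k := by
  rw [show (n+1) = ((n+1).toNat : Int) by omega, PySem.List.pyRange_zero_natCast,
      PySem.List.pyGetD_of_nonneg _ _ h0,
      PySem.List.getD_map_range _ _ _ _ (by omega)]
  omega

lemma pv_getD_set (xs : List Int) (j k v : Int) (hj : 0 ≤ j) (hk : 0 ≤ k) :
    PySem.List.pyGetD (PySem.List.pySetD xs j v) k 0 =
      if k = j ∧ j.toNat < xs.length then v else PySem.List.pyGetD xs k 0 := by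
  rw [PySem.List.pySetD_of_nonneg _ _ hj, PySem.List.pyGetD_of_nonneg _ _ hk,
      PySem.List.pyGetD_of_nonneg _ _ hk,
      List.getD_eq_getElem?_getD, List.getElem?_set, List.getD_eq_getElem?_getD]
  by_cases hkj : k = j
  · subst hkj
    by_cases hb : k.toNat < xs.length
    · simp [hb]
    · rw [if_pos rfl, if_neg hb, if_neg (by omega : ¬(k = k ∧ k.toNat < xs.length)),
          List.getElem?_eq_none (by omega : xs.length ≤ k.toNat)]
  · rw [if_neg (by omega : ¬ j.toNat = k.toNat), if_neg (by tauto)]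

-- the spf invariant used by both mask loops
def pvGood (n : Int) (spf : List Int) : Prop :=
  spf.length = (n + 1).toNat ∧
  ∀ k : Int, 2 ≤ k → k ≤ n →
    (2 ≤ PySem.List.pyGetD spf k 0 ∧ PySem.List.pyGetD spf k 0 ∣ k ∧
      PySem.List.pyGetD spf k 0 ≤ k)

lemma pvGood_row (n i : Int) (spf : List Int) (h2 : 2 ≤ i) (hg : pvGood n spf) :
    pvGood n (pvSieveRow n i spf) := by
  unfold pvSieveRow
  refine List.foldlRecOn _ _ hg ?_
  intro s hs j hj
  rw [PySem.List.mem_pyRange_iff_of_pos (by omega)] at hj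
  obtain ⟨hj1, hj2, hj3⟩ := hj
  have hii : 2 ≤ i * i := by nlinarith
  have hij : i ≤ j := by nlinarith
  have hdvd : i ∣ j := by
    obtain ⟨t, ht⟩ := hj3
    exact ⟨i + t, by linarith [ht]⟩
  split
  · refine ⟨by rw [PySem.List.length_pySetD]; exact hs.1, ?_⟩
    intro k hk2 hkn
    rw [pv_getD_set _ _ _ _ (by omega) (by omega)]
    split
    · rename_i hcase
      have hkj : k = j := hcase.1
      subst hkj
      exact ⟨h2, hdvd, hij⟩
    · exact hs.2 k hk2 hkn
  · exact hs

lemma pvGood_sieve (n : Int) :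
    pvGood n ((PySem.List.pyRange 2 ((Nat.sqrt n.toNat : Int) + 1)).foldl
      (fun spf i => if PySem.List.pyGetD spf i 0 == i then pvSieveRow n i spf else spf)
      (PySem.List.pyRange 0 (n + 1))) := by
  refine List.foldlRecOn _ _ ⟨pv_len_range0 n, ?_⟩ ?_
  · intro k hk2 hkn
    rw [pv_getD_range0 n k (by omega) hkn]
    exact ⟨hk2, dvd_refl k, le_refl k⟩
  · intro s hs i hi
    rw [PySem.List.mem_pyRange_one] at hi
    split
    · exact pvGood_row n i s (by omega) hs
    · exact hs

-- ---- the emax loops agree ----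
lemma pvEmaxLoop_exit (n p t : Int) (h : ¬ t ≤ n) : ∀ f e, pvEmaxLoop n p f e t = e := by
  intro f e; cases f <;> simp [pvEmaxLoop, h]

lemma pvEmaxLoop_fuel (n p : Int) (hp : 2 ≤ p) :
    ∀ (f f' : Nat) (e t : Int), 1 ≤ t → (n + 1 - t).toNat ≤ f → (n + 1 - t).toNat ≤ f' →
      pvEmaxLoop n p f e t = pvEmaxLoop n p f' e t := by
  intro f
  induction f with
  | zero =>
    intro f' e t ht h1 h2
    have h : ¬ t ≤ n := by omega
    rw [pvEmaxLoop_exit n p t h, pvEmaxLoop_exit n p t h]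
  | succ f ih =>
    intro f' e t ht h1 h2
    by_cases h : t ≤ n
    · obtain ⟨f'', rfl⟩ : ∃ f'', f' = f'' + 1 := ⟨f' - 1, by omega⟩
      simp only [pvEmaxLoop, if_pos h]
      have htp : t + 1 ≤ t * p := by nlinarith
      exact ih f'' (e + 1) (t * p) (by omega) (by omega) (by omega)
    · rw [pvEmaxLoop_exit n p t h, pvEmaxLoop_exit n p t h]

lemma pvEmax_AB (n p : Int) (hp : 2 ≤ p) (hpn : p ≤ n) :
    pvEmaxLoop n p (n.toNat + 1) 0 p = pvEmaxLoop n p (n.toNat + 1) 1 (p * p) := by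
  have h4 : 4 ≤ p * p := by nlinarith
  have step : pvEmaxLoop n p (n.toNat + 1) 0 p = pvEmaxLoop n p n.toNat 1 (p * p) := by
    simp [pvEmaxLoop, if_pos hpn]
  rw [step]
  exact pvEmaxLoop_fuel n p hp n.toNat (n.toNat + 1) 1 (p * p) (by omega) (by omega) (by omega)

-- ---- the division loops agree ----
lemma pv_div_shrink {p x : Int} (hp : 2 ≤ p) (hx : 1 ≤ x) (hdvd : p ∣ x) :
    1 ≤ x / p ∧ x / p < x := by
  obtain ⟨c, rfl⟩ := hdvd
  rw [Int.mul_ediv_cancel_left _ (by omega)]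
  have hc : 1 ≤ c := by nlinarith
  exact ⟨hc, by nlinarith⟩

lemma pvDivLoop_fuel (p : Int) (hp : 2 ≤ p) :
    ∀ (f f' : Nat) (e x : Int), 1 ≤ x → x.toNat ≤ f → x.toNat ≤ f' →
      pvDivLoop p f e x = pvDivLoop p f' e x := by
  intro f
  induction f with
  | zero => intro f' e x hx h1 h2; omega
  | succ f ih =>
    intro f' e x hx h1 h2
    obtain ⟨f'', rfl⟩ : ∃ f'', f' = f'' + 1 := ⟨f' - 1, by omega⟩
    by_cases h : p ∣ x
    · have hmod : (PySem.Int.mod x p == 0) = true := by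
        simp [(PySem.Int.mod_eq_zero_iff_dvd x p).mpr h]
      simp only [pvDivLoop, hmod, if_true]
      rw [PySem.Int.floordiv_eq_ediv_of_pos (by omega)]
      obtain ⟨hx1, hx2⟩ := pv_div_shrink hp hx h
      exact ih f'' (e + 1) (x / p) hx1 (by omega) (by omega)
    · have hmod : (PySem.Int.mod x p == 0) = false := by
        simp [PySem.Int.mod_eq_zero_iff_dvd x p, h]
      simp [pvDivLoop, hmod]

lemma pvDivLoop_bounds (p : Int) (hp : 2 ≤ p) :
    ∀ (f : Nat) (e x : Int), 1 ≤ x → x.toNat ≤ f →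
      1 ≤ (pvDivLoop p f e x).2 ∧ (pvDivLoop p f e x).2 ≤ x ∧
        (p ∣ x → (pvDivLoop p f e x).2 < x) := by
  intro f
  induction f with
  | zero => intro e x hx h1; omega
  | succ f ih =>
    intro e x hx h1
    by_cases h : p ∣ x
    · have hmod : (PySem.Int.mod x p == 0) = true := by
        simp [(PySem.Int.mod_eq_zero_iff_dvd x p).mpr h]
      simp only [pvDivLoop, hmod, if_true]
      rw [PySem.Int.floordiv_eq_ediv_of_pos (by omega)]
      obtain ⟨hx1, hx2⟩ := pv_div_shrink hp hx h
      obtain ⟨b1, b2, _⟩ := ih (e + 1) (x / p) hx1 (by omega)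
      exact ⟨b1, by omega, fun _ => by omega⟩
    · have hmod : (PySem.Int.mod x p == 0) = false := by
        simp [PySem.Int.mod_eq_zero_iff_dvd x p, h]
      simp [pvDivLoop, hmod, hx, h]

lemma pvDivLoop_unroll (p x : Int) (hp : 2 ≤ p) (hx : 2 ≤ x) (hdvd : p ∣ x) :
    pvDivLoop p x.toNat 0 x = pvDivLoop p x.toNat 1 (PySem.Int.floordiv x p) := by
  obtain ⟨f, hf⟩ : ∃ f, x.toNat = f + 1 := ⟨x.toNat - 1, by omega⟩
  have hmod : (PySem.Int.mod x p == 0) = true := by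
    simp [(PySem.Int.mod_eq_zero_iff_dvd x p).mpr hdvd]
  rw [hf]
  simp only [pvDivLoop, hmod, if_true]
  rw [show (0:Int) + 1 = 1 from rfl]
  rw [PySem.Int.floordiv_eq_ediv_of_pos (by omega : (0:Int) < p)]
  obtain ⟨hx1, hx2⟩ := pv_div_shrink hp (by omega) hdvd
  exact pvDivLoop_fuel p hp f (f + 1) 1 (x / p) hx1 (by omega) (by omega)

-- ---- the prime_info folds agree (A folds over the primes list, B with an if-guard) ----
lemma pv_getD_of_rel (pA : PySem.Dict Int (Int × Int)) (pB : PySem.Dict Int Int)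
    (hrel : ∀ q : Int, (pA.get? q).map (·.2) = pB.get? q) (p : Int) :
    (pA.getD p (0, 0)).2 = pB.getD p 0 := by
  have h := hrel p
  rcases hA : pA.get? p with _ | v
  · rw [hA] at h
    simp only [Option.map_none] at h
    simp [PySem.Dict.getD, hA, ← h]
  · rw [hA] at h
    simp only [Option.map_some] at h
    simp [PySem.Dict.getD, hA, ← h]

-- proof-side abbreviations for the two prime_info loop bodies
def pvStepA (n : Int) (st : List (Int × Int × Int) × PySem.Dict Int (Int × Int) × Int) (p : Int) :
    List (Int × Int × Int) × PySem.Dict Int (Int × Int) × Int :=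
  (st.1 ++ [(p, pvEmaxLoop n p (n.toNat + 1) 0 p, st.2.2)],
   st.2.1.insert p (pvEmaxLoop n p (n.toNat + 1) 0 p, st.2.2),
   st.2.2 + pvEmaxLoop n p (n.toNat + 1) 0 p)

def pvStepB (n : Int) (st : List (Int × Int × Int) × PySem.Dict Int Int × Int) (p : Int) :
    List (Int × Int × Int) × PySem.Dict Int Int × Int :=
  (st.1 ++ [(p, pvEmaxLoop n p (n.toNat + 1) 1 (p * p), st.2.2)],
   st.2.1.insert p st.2.2,
   st.2.2 + pvEmaxLoop n p (n.toNat + 1) 1 (p * p))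

lemma pvRel_fold (n : Int) :
    ∀ (l : List Int), (∀ p ∈ l, 2 ≤ p ∧ p ≤ n) →
    ∀ (a : List (Int × Int × Int) × PySem.Dict Int (Int × Int) × Int)
      (b : List (Int × Int × Int) × PySem.Dict Int Int × Int),
      a.1 = b.1 → a.2.2 = b.2.2 → (∀ q : Int, (a.2.1.get? q).map (·.2) = b.2.1.get? q) →
      (l.foldl (pvStepA n) a).1 = (l.foldl (pvStepB n) b).1 ∧
      (l.foldl (pvStepA n) a).2.2 = (l.foldl (pvStepB n) b).2.2 ∧
      ∀ q : Int, ((l.foldl (pvStepA n) a).2.1.get? q).map (·.2) =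
        (l.foldl (pvStepB n) b).2.1.get? q := by
  intro l
  induction l with
  | nil => intro _ a b h1 h2 h3; exact ⟨h1, h2, h3⟩
  | cons p l ih =>
    intro hl a b h1 h2 h3
    obtain ⟨hp2, hpn⟩ := hl p (List.mem_cons_self)
    have hemax : pvEmaxLoop n p (n.toNat + 1) 0 p = pvEmaxLoop n p (n.toNat + 1) 1 (p * p) :=
      pvEmax_AB n p hp2 hpn
    simp only [List.foldl_cons]
    refine ih (fun q hq => hl q (List.mem_cons_of_mem _ hq)) _ _ ?_ ?_ ?_
    · simp only [pvStepA, pvStepB, h1, h2, hemax]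
    · simp only [pvStepA, pvStepB, h2, hemax]
    · intro q
      by_cases hq : q = p
      · subst hq
        simp only [pvStepA, pvStepB]
        rw [PySem.Dict.get?_insert_self, PySem.Dict.get?_insert_self]
        simp [h2]
      · simp only [pvStepA, pvStepB]
        rw [PySem.Dict.get?_insert_of_ne _ _ hq, PySem.Dict.get?_insert_of_ne _ _ hq]
        exact h3 q

-- ---- the mask computations agree ----
lemma pvMaskLoopA_nonneg (spf : List Int) (pinfo : PySem.Dict Int (Int × Int)) :
    ∀ (f : Nat) (x mask : Int), 0 ≤ mask → 0 ≤ pvMaskLoopA spf pinfo f x mask := by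
  intro f
  induction f with
  | zero => intro x mask h; simpa [pvMaskLoopA] using h
  | succ f ih =>
    intro x mask h
    simp only [pvMaskLoopA]
    split
    · exact ih _ _ (pv_bor_nonneg h (Int.natCast_nonneg _))
    · exact h

lemma pvMaskLoopA_fuel (n : Int) (spf : List Int) (pinfo : PySem.Dict Int (Int × Int))
    (hg : pvGood n spf) :
    ∀ (f f' : Nat) (x mask : Int), 1 ≤ x → x ≤ n → x.toNat ≤ f → x.toNat ≤ f' →
      pvMaskLoopA spf pinfo f x mask = pvMaskLoopA spf pinfo f' x mask := by
  intro f
  induction f with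
  | zero => intro f' x mask hx hxn h1 h2; omega
  | succ f ih =>
    intro f' x mask hx hxn h1 h2
    obtain ⟨f'', rfl⟩ : ∃ f'', f' = f'' + 1 := ⟨f' - 1, by omega⟩
    by_cases hx1 : 1 < x
    · obtain ⟨hp2, hdvd, hple⟩ := hg.2 x (by omega) hxn
      simp only [pvMaskLoopA, if_pos hx1]
      obtain ⟨b1, b2, b3⟩ :=
        pvDivLoop_bounds (PySem.List.pyGetD spf x 0) hp2 x.toNat 0 x (by omega) (le_refl _)
      have hlt := b3 hdvd
      exact ih f'' _ _ b1 (by omega) (by omega) (by omega)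
    · simp only [pvMaskLoopA, if_neg hx1]

lemma pvMaskLoopA_acc (spf : List Int) (pinfo : PySem.Dict Int (Int × Int)) :
    ∀ (f : Nat) (x mask : Int), 0 ≤ mask →
      pvMaskLoopA spf pinfo f x mask = PySem.Int.bor mask (pvMaskLoopA spf pinfo f x 0) := by
  intro f
  induction f with
  | zero => intro x mask h; simp [pvMaskLoopA, PySem.Int.bor_zero]
  | succ f ih =>
    intro x mask h
    by_cases hx1 : 1 < x
    · simp only [pvMaskLoopA, if_pos hx1]
      rw [ih _ _ (pv_bor_nonneg h (Int.natCast_nonneg _)),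
          ih _ _ (pv_bor_nonneg (le_refl 0) (Int.natCast_nonneg _)),
          pv_zero_bor]
      exact pv_bor_assoc h (Int.natCast_nonneg _)
        (pvMaskLoopA_nonneg spf pinfo f _ 0 (le_refl 0))
    · simp only [pvMaskLoopA, if_neg hx1, PySem.Int.bor_zero]

lemma pvMask_step (n : Int) (spf : List Int) (pA : PySem.Dict Int (Int × Int)) (pB : PySem.Dict Int Int)
    (hg : pvGood n spf) (hrel : ∀ q : Int, (pA.get? q).map (·.2) = pB.get? q)
    (m : Int) (hm : 2 ≤ m) (hmn : m ≤ n) :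
    pvMaskLoopA spf pA m.toNat m 0 =
      PySem.Int.bor
        ((((1 <<< (pvDivLoop (PySem.List.pyGetD spf m 0) m.toNat 1
                (PySem.Int.floordiv m (PySem.List.pyGetD spf m 0))).1.toNat) - 1)
             <<< ((pB.getD (PySem.List.pyGetD spf m 0) 0).toNat) : Nat) : Int)
        (pvMaskLoopA spf pA
          (pvDivLoop (PySem.List.pyGetD spf m 0) m.toNat 1
            (PySem.Int.floordiv m (PySem.List.pyGetD spf m 0))).2.toNat
          (pvDivLoop (PySem.List.pyGetD spf m 0) m.toNat 1
            (PySem.Int.floordiv m (PySem.List.pyGetD spf m 0))).2 0) := by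
  obtain ⟨hp2, hdvd, hple⟩ := hg.2 m hm hmn
  have hunroll := pvDivLoop_unroll (PySem.List.pyGetD spf m 0) m hp2 hm hdvd
  obtain ⟨b1, b2, b3⟩ :=
    pvDivLoop_bounds (PySem.List.pyGetD spf m 0) hp2 m.toNat 0 m (by omega) (le_refl _)
  rw [hunroll] at b1 b2 b3
  have hlt := b3 hdvd
  obtain ⟨f, hf⟩ : ∃ f, m.toNat = f + 1 := ⟨m.toNat - 1, by omega⟩
  have hoff := pv_getD_of_rel pA pB hrel (PySem.List.pyGetD spf m 0)
  conv_lhs => rw [hf]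
  simp only [pvMaskLoopA, if_pos (show 1 < m by omega)]
  rw [hunroll, hoff, pv_zero_bor,
      pvMaskLoopA_acc spf pA f _ _ (Int.natCast_nonneg _)]
  congr 1
  exact pvMaskLoopA_fuel n spf pA hg f _ _ 0 b1 (by omega) (by omega) (by omega)

def pvMStepA (spf : List Int) (pA : PySem.Dict Int (Int × Int)) (masks : List Int) (m : Int) :
    List Int :=
  PySem.List.pySetD masks m (pvMaskLoopA spf pA m.toNat m 0)

def pvMStepB (spf : List Int) (pB : PySem.Dict Int Int) (masks : List Int) (m : Int) :
    List Int :=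
  PySem.List.pySetD masks m
    (PySem.Int.bor
      ((((1 <<< (pvDivLoop (PySem.List.pyGetD spf m 0) m.toNat 1
              (PySem.Int.floordiv m (PySem.List.pyGetD spf m 0))).1.toNat) - 1)
           <<< ((pB.getD (PySem.List.pyGetD spf m 0) 0).toNat) : Nat) : Int)
      (PySem.List.pyGetD masks
        (pvDivLoop (PySem.List.pyGetD spf m 0) m.toNat 1
          (PySem.Int.floordiv m (PySem.List.pyGetD spf m 0))).2 0))

lemma pv_getD_replicate0 (L : Nat) (k : Int) (hk : 0 ≤ k) :
    PySem.List.pyGetD (List.replicate L (0 : Int)) k 0 = 0 := by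
  rw [PySem.List.pyGetD_of_nonneg _ _ hk, List.getD_eq_getElem?_getD,
      List.getElem?_replicate]
  split <;> rfl

lemma pvMasksA_spec (n : Int) (spf : List Int) (pA : PySem.Dict Int (Int × Int)) (hn : 1 ≤ n) :
    ∀ (d : Nat), 2 + (d : Int) ≤ n + 1 →
      (((PySem.List.pyRange 2 (2 + (d : Int))).foldl (pvMStepA spf pA)
          (PySem.List.pySetD (PySem.List.pyRepeat [(0:Int)] (n + 1)) 1 0)).length
        = (n + 1).toNat) ∧
      ∀ k : Int, 0 ≤ k → k ≤ n →
        PySem.List.pyGetD ((PySem.List.pyRange 2 (2 + (d : Int))).foldl (pvMStepA spf pA)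
            (PySem.List.pySetD (PySem.List.pyRepeat [(0:Int)] (n + 1)) 1 0)) k 0 =
          if 2 ≤ k ∧ k < 2 + (d : Int) then pvMaskLoopA spf pA k.toNat k 0 else 0 := by
  intro d
  induction d with
  | zero =>
    intro _
    rw [show ((2:Int) + ((0:Nat):Int)) = 2 by norm_num, PySem.List.pyRange_one_eq_nil (le_refl 2)]
    simp only [List.foldl_nil]
    constructor
    · rw [PySem.List.length_pySetD, PySem.List.pyRepeat_singleton, List.length_replicate]
    · intro k hk0 hkn
      rw [if_neg (by omega), PySem.List.pyRepeat_singleton,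
          pv_getD_set _ _ _ _ (by omega) hk0]
      split
      · rfl
      · exact pv_getD_replicate0 _ _ hk0
  | succ d ih =>
    intro hd
    have h2d : (2:Int) ≤ 2 + (d:Int) := by omega
    rw [show ((2:Int) + ((d+1:Nat):Int)) = (2 + (d:Int)) + 1 by push_cast; ring,
        PySem.List.pyRange_one_succ_right h2d, List.foldl_append, List.foldl_cons, List.foldl_nil]
    obtain ⟨ihl, ihg⟩ := ih (by omega)
    have hb : ((2:Int) + (d:Int)).toNat <
        (((PySem.List.pyRange 2 (2 + (d : Int))).foldl (pvMStepA spf pA)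
          (PySem.List.pySetD (PySem.List.pyRepeat [(0:Int)] (n + 1)) 1 0))).length := by
      rw [ihl]; omega
    constructor
    · rw [pvMStepA, PySem.List.length_pySetD, ihl]
    · intro k hk0 hkn
      rw [pvMStepA, pv_getD_set _ _ _ _ (by omega) hk0]
      by_cases hk : k = 2 + (d:Int)
      · rw [if_pos ⟨hk, hb⟩, if_pos (by omega), hk]
      · rw [if_neg (by tauto), ihg k hk0 hkn]
        by_cases h2k : 2 ≤ k ∧ k < 2 + (d:Int)
        · rw [if_pos h2k, if_pos (by omega)]
        · rw [if_neg h2k, if_neg (by omega)]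

lemma pvMasksB_spec (n : Int) (spf : List Int) (pA : PySem.Dict Int (Int × Int))
    (pB : PySem.Dict Int Int) (hg : pvGood n spf)
    (hrel : ∀ q : Int, (pA.get? q).map (·.2) = pB.get? q) (hn : 1 ≤ n) :
    ∀ (d : Nat), 2 + (d : Int) ≤ n + 1 →
      (((PySem.List.pyRange 2 (2 + (d : Int))).foldl (pvMStepB spf pB)
          (PySem.List.pyRepeat [(0:Int)] (n + 1))).length = (n + 1).toNat) ∧
      ∀ k : Int, 0 ≤ k → k ≤ n →
        PySem.List.pyGetD ((PySem.List.pyRange 2 (2 + (d : Int))).foldl (pvMStepB spf pB)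
            (PySem.List.pyRepeat [(0:Int)] (n + 1))) k 0 =
          if 2 ≤ k ∧ k < 2 + (d : Int) then pvMaskLoopA spf pA k.toNat k 0 else 0 := by
  intro d
  induction d with
  | zero =>
    intro _
    rw [show ((2:Int) + ((0:Nat):Int)) = 2 by norm_num, PySem.List.pyRange_one_eq_nil (le_refl 2)]
    simp only [List.foldl_nil]
    constructor
    · rw [PySem.List.pyRepeat_singleton, List.length_replicate]
    · intro k hk0 hkn
      rw [if_neg (by omega), PySem.List.pyRepeat_singleton]
      exact pv_getD_replicate0 _ _ hk0
  | succ d ih =>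
    intro hd
    have h2d : (2:Int) ≤ 2 + (d:Int) := by omega
    rw [show ((2:Int) + ((d+1:Nat):Int)) = (2 + (d:Int)) + 1 by push_cast; ring,
        PySem.List.pyRange_one_succ_right h2d, List.foldl_append, List.foldl_cons, List.foldl_nil]
    obtain ⟨ihl, ihg⟩ := ih (by omega)
    set m : Int := 2 + (d:Int) with hm
    have hm2 : 2 ≤ m := by omega
    have hmn : m ≤ n := by omega
    obtain ⟨hp2, hdvd, hple⟩ := hg.2 m hm2 hmn
    have hunroll := pvDivLoop_unroll (PySem.List.pyGetD spf m 0) m hp2 hm2 hdvd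
    obtain ⟨b1, b2, b3⟩ :=
      pvDivLoop_bounds (PySem.List.pyGetD spf m 0) hp2 m.toNat 0 m (by omega) (le_refl _)
    rw [hunroll] at b1 b2 b3
    have hlt := b3 hdvd
    have hstored : PySem.List.pyGetD
        ((PySem.List.pyRange 2 m).foldl (pvMStepB spf pB) (PySem.List.pyRepeat [(0:Int)] (n + 1)))
        (pvDivLoop (PySem.List.pyGetD spf m 0) m.toNat 1
          (PySem.Int.floordiv m (PySem.List.pyGetD spf m 0))).2 0 =
        pvMaskLoopA spf pA
          (pvDivLoop (PySem.List.pyGetD spf m 0) m.toNat 1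
            (PySem.Int.floordiv m (PySem.List.pyGetD spf m 0))).2.toNat
          (pvDivLoop (PySem.List.pyGetD spf m 0) m.toNat 1
            (PySem.Int.floordiv m (PySem.List.pyGetD spf m 0))).2 0 := by
      rw [ihg _ (by omega) (by omega)]
      by_cases hr2 : 2 ≤ (pvDivLoop (PySem.List.pyGetD spf m 0) m.toNat 1
          (PySem.Int.floordiv m (PySem.List.pyGetD spf m 0))).2
      · rw [if_pos ⟨hr2, by omega⟩]
      · have hr1 : (pvDivLoop (PySem.List.pyGetD spf m 0) m.toNat 1
            (PySem.Int.floordiv m (PySem.List.pyGetD spf m 0))).2 = 1 := by omega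
        rw [if_neg (by omega), hr1]
        simp [pvMaskLoopA]
    constructor
    · rw [pvMStepB, PySem.List.length_pySetD, ihl]
    · intro k hk0 hkn
      rw [pvMStepB, pv_getD_set _ _ _ _ (by omega) hk0]
      by_cases hk : k = m
      · rw [if_pos ⟨hk, by rw [ihl]; omega⟩, if_pos (by omega), hk, hstored,
            ← pvMask_step n spf pA pB hg hrel m hm2 hmn]
      · rw [if_neg (by tauto), ihg k hk0 hkn]
        by_cases h2k : 2 ≤ k ∧ k < m
        · rw [if_pos h2k, if_pos (by omega)]
        · rw [if_neg h2k, if_neg (by omega)]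

lemma pv_lists_eq (xs ys : List Int) (L : Nat) (hx : xs.length = L) (hy : ys.length = L)
    (h : ∀ k : Int, 0 ≤ k → k < (L : Int) →
      PySem.List.pyGetD xs k 0 = PySem.List.pyGetD ys k 0) : xs = ys := by
  apply List.ext_getElem (by omega)
  intro i h1 h2
  have hh := h (i : Int) (by omega) (by exact_mod_cast (show i < L by omega))
  rw [PySem.List.pyGetD_of_nonneg _ _ (by omega), PySem.List.pyGetD_of_nonneg _ _ (by omega)] at hh
  simpa [List.getD_eq_getElem?_getD, List.getElem?_eq_getElem, h1, h2,
    Int.toNat_natCast] using hh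

lemma pv_main (n : Int) (hn : 1 ≤ n) : build_prime_masks n = build_prime_masks_alt n := by
  show ((PySem.List.pyRange 2 (n + 1)).foldl (pvMStepA ((PySem.List.pyRange 2 (((Nat.sqrt n.toNat : Nat) : Int) + 1)).foldl (fun spf i => if PySem.List.pyGetD spf i 0 == i then pvSieveRow n i spf else spf) (PySem.List.pyRange 0 (n + 1))) (((PySem.List.pyRange 2 (n + 1)).foldl (fun acc i => if PySem.List.pyGetD ((PySem.List.pyRange 2 (((Nat.sqrt n.toNat : Nat) : Int) + 1)).foldl (fun spf i => if PySem.List.pyGetD spf i 0 == i then pvSieveRow n i spf else spf) (PySem.List.pyRange 0 (n + 1))) i 0 == i then acc ++ [i] else acc) []).foldl (pvStepA n) ([], PySem.Dict.empty, 0)).2.1) (PySem.List.pySetD (PySem.List.pyRepeat [(0:Int)] (n + 1)) 1 0), (((PySem.List.pyRange 2 (n + 1)).foldl (fun acc i => if PySem.List.pyGetD ((PySem.List.pyRange 2 (((Nat.sqrt n.toNat : Nat) : Int) + 1)).foldl (fun spf i => if PySem.List.pyGetD spf i 0 == i then pvSieveRow n i spf else spf) (PySem.List.pyRange 0 (n +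 1))) i 0 == i then acc ++ [i] else acc) []).foldl (pvStepA n) ([], PySem.Dict.empty, 0)).1) = ((PySem.List.pyRange 2 (n + 1)).foldl (pvMStepB (pvSieveB n (n.toNat + 1) 2 (PySem.List.pyRange 0 (n + 1))) ((PySem.List.pyRange 2 (n + 1)).foldl (fun st p => if PySem.List.pyGetD (pvSieveB n (n.toNat + 1) 2 (PySem.List.pyRange 0 (n + 1))) p 0 == p then pvStepB n st p else st) ([], PySem.Dict.empty, 0)).2.1) (PySem.List.pyRepeat [(0:Int)] (n + 1)), ((PySem.List.pyRange 2 (n + 1)).foldl (fun st p => if PySem.List.pyGetD (pvSieveB n (n.toNat + 1) 2 (PySem.List.pyRange 0 (n + 1))) p 0 == p then pvStepB n st p else st) ([], PySem.Dict.empty, 0)).1)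
  have hsq : ((Nat.sqrt n.toNat + 1 : Nat) : Int) - 2 ≤ ((n.toNat + 1 : Nat) : Int) := by
    have := Nat.sqrt_le_self n.toNat
    push_cast
    omega
  rw [pvSieveB_eq n (n.toNat + 1) 2 (PySem.List.pyRange 0 (n + 1)) (by norm_num)
      (by push_cast at hsq ⊢; omega)]
  set spf := (PySem.List.pyRange 2 (((Nat.sqrt n.toNat : Nat) : Int) + 1)).foldl (fun spf i => if PySem.List.pyGetD spf i 0 == i then pvSieveRow n i spf else spf) (PySem.List.pyRange 0 (n + 1)) with hspf
  have hg : pvGood n spf := by rw [hspf]; exact pvGood_sieve n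
  rw [PySem.List.foldl_append_if_eq_filter, List.nil_append,
      PySem.List.foldl_if_eq_foldl_filter (p := fun i => PySem.List.pyGetD spf i 0 == i)
        (f := pvStepB n)]
  set l := (PySem.List.pyRange 2 (n + 1)).filter (fun i => PySem.List.pyGetD spf i 0 == i) with hl
  have hlmem : ∀ p ∈ l, 2 ≤ p ∧ p ≤ n := by
    intro p hp
    rw [hl] at hp
    have := (List.mem_filter.mp hp).1
    rw [PySem.List.mem_pyRange_one] at this
    omega
  obtain ⟨h1, h2, h3⟩ := pvRel_fold n l hlmem ([], PySem.Dict.empty, 0) ([], PySem.Dict.empty, 0)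
    rfl rfl (fun q => by simp [PySem.Dict.empty, PySem.Dict.get?])
  set stA := l.foldl (pvStepA n) ([], PySem.Dict.empty, 0) with hstA
  set stB := l.foldl (pvStepB n) ([], PySem.Dict.empty, 0) with hstB
  have hA := pvMasksA_spec n spf stA.2.1 hn (n - 1).toNat (by omega)
  have hB := pvMasksB_spec n spf stA.2.1 stB.2.1 hg h3 hn (n - 1).toNat (by omega)
  rw [show ((2:Int) + (((n - 1).toNat : Nat) : Int)) = n + 1 by omega] at hA hB
  obtain ⟨hAl, hAg⟩ := hA
  obtain ⟨hBl, hBg⟩ := hB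
  have hmasks : (PySem.List.pyRange 2 (n + 1)).foldl (pvMStepA spf stA.2.1)
        (PySem.List.pySetD (PySem.List.pyRepeat [(0:Int)] (n + 1)) 1 0) =
      (PySem.List.pyRange 2 (n + 1)).foldl (pvMStepB spf stB.2.1)
        (PySem.List.pyRepeat [(0:Int)] (n + 1)) := by
    apply pv_lists_eq _ _ (n + 1).toNat hAl hBl
    intro k hk0 hkL
    rw [hAg k hk0 (by omega), hBg k hk0 (by omega)]
  rw [hmasks, h1]

-- ===== VERDICT (by name: the statement is the Claim_ definition above) =====
theorem build_prime_masks_spec : Claim_equal_build_prime_masks := by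
  intro n _ hpre
  unfold Spec_build_prime_masks
  exact pv_main n hpre
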